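-- pv_equiv track=rewrite | github.com/qiniu/python-sdk | qiniu/utils.py | canonical_mime_header_key
-- ===== SOURCE A (Python) =====
-- def _valid_header_key_char(ch):
--     is_token_table = [
--         "!", "#", "$", "%", "&", "\\", "*", "+", "-", ".",
--         "0", "1", "2", "3", "4", "5", "6", "7", "8", "9",
--         "A", "B", "C", "D", "E", "F", "G", "H", "I", "J",
--         "K", "L", "M", "N", "O", "P", "Q", "R", "S", "T",
--         "U", "W", "V", "X", "Y", "Z",
--         "^", "_", "`",
--         "a", "b", "c", "d", "e", "f", "g", "h", "i", "j",
--         "k", "l", "m", "n", "o", "p", "q", "r", "s", "t",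
--         "u", "v", "w", "x", "y", "z",
--         "|", "~"]
--     return 0 <= ord(ch) < 128 and ch in is_token_table
--
-- def canonical_mime_header_key(field_name):
--     for ch in field_name:
--         if not _valid_header_key_char(ch):
--             return field_name
--     result = ""
--     upper = True
--     for ch in field_name:
--         if upper and "a" <= ch <= "z":
--             result += ch.upper()
--         elif not upper and "A" <= ch <= "Z":
--             result += ch.lower()
--         else:
--             result += ch
--         upper = ch == "-"
--     return result
-- ===== SOURCE B (Python) =====
-- _TOKEN_CHARS = "!#$%&\\*+-.0123456789ABCDEFGHIJKLMNOPQRSTUWVXYZ^_`abcdefghijklmnopqrstuvwxyz|~"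
--
-- def canonical_mime_header_key(field_name):
--     if not all(ch in _TOKEN_CHARS for ch in field_name):
--         return field_name
--     return "-".join(seg.capitalize() for seg in field_name.split("-"))
-- ===== Notes on version B (the rewrite author's own statement) =====
-- stated objective: simpler
-- what changed: Replaces the stateful char-by-char casing loop (string accumulator plus an 'upper' flag carried across iterations) with a stateless split/capitalize-each-segment/join pipeline, and the early-return validation loop with all().
import Mathlib
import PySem

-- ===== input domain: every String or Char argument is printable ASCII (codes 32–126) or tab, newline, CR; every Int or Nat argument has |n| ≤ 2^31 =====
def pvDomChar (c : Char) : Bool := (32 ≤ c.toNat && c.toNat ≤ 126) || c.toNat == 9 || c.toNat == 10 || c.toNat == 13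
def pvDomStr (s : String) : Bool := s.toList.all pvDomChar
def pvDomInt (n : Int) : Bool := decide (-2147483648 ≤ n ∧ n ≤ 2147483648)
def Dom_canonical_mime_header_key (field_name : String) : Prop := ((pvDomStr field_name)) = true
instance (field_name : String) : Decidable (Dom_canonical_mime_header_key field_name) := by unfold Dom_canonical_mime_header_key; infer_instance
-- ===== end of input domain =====

-- B replaces A's stateful char-by-char casing loop by split-on-'-' / capitalize / join (objective: simpler).

-- ===== PORT A =====
-- the is_token_table list, in A's order
def pvTokenTableA : List Char :=
  ['!', '#', '$', '%', '&', '\\', '*', '+', '-', '.',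
   '0', '1', '2', '3', '4', '5', '6', '7', '8', '9',
   'A', 'B', 'C', 'D', 'E', 'F', 'G', 'H', 'I', 'J',
   'K', 'L', 'M', 'N', 'O', 'P', 'Q', 'R', 'S', 'T',
   'U', 'W', 'V', 'X', 'Y', 'Z',
   '^', '_', '`',
   'a', 'b', 'c', 'd', 'e', 'f', 'g', 'h', 'i', 'j',
   'k', 'l', 'm', 'n', 'o', 'p', 'q', 'r', 's', 't',
   'u', 'v', 'w', 'x', 'y', 'z',
   '|', '~']

def pvValidHeaderKeyChar (ch : Char) : Bool :=
  decide (0 ≤ ch.toNat ∧ ch.toNat < 128) && pvTokenTableA.contains ch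

-- the second loop of A: result accumulator + the 'upper' flag; ch.upper()/ch.lower() are
-- PySem.Chars.upperChar/lowerChar (exact here: the branches guarantee an a-z / A-Z char)
def pvCaseLoopA : List Char → List Char → Bool → List Char
  | [], result, _ => result
  | ch :: rest, result, upper =>
    let c : Char :=
      if upper = true ∧ 'a' ≤ ch ∧ ch ≤ 'z' then PySem.Chars.upperChar ch
      else if ¬ upper = true ∧ 'A' ≤ ch ∧ ch ≤ 'Z' then PySem.Chars.lowerChar ch
      else ch
    pvCaseLoopA rest (result ++ [c]) (ch == '-')

def canonical_mime_header_key (field_name : String) : String :=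
  -- the first loop returns field_name at the first invalid char
  if field_name.toList.all pvValidHeaderKeyChar then
    String.ofList (pvCaseLoopA field_name.toList [] true)
  else field_name

-- ===== PORT B =====
def pvTokenCharsB : List Char := "!#$%&\\*+-.0123456789ABCDEFGHIJKLMNOPQRSTUWVXYZ^_`abcdefghijklmnopqrstuvwxyz|~".toList

-- str.capitalize(): first char upper-cased, the rest lower-cased (exact on ASCII)
def pvCapitalize (seg : List Char) : List Char :=
  match seg with
  | [] => []
  | c :: rest => PySem.Chars.upperChar c :: rest.map PySem.Chars.lowerChar

def canonical_mime_header_key_alt (field_name : String) : String :=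
  if field_name.toList.all (fun ch => pvTokenCharsB.contains ch) then
    String.ofList (List.intercalate ['-'] ((field_name.toList.splitOn '-').map pvCapitalize))
  else field_name

-- ===== PRECONDITION & SPEC =====
def Spec_canonical_mime_header_key (field_name : String) (out : String) : Prop := out = canonical_mime_header_key_alt field_name
instance (field_name : String) (out : String) : Decidable (Spec_canonical_mime_header_key field_name out) := by unfold Spec_canonical_mime_header_key; infer_instance

-- ===== CLAIM (what is proved, stated in full; the proofs are below) =====
def Claim_equal_canonical_mime_header_key : Prop := ∀ (field_name : String), Dom_canonical_mime_header_key field_name → Spec_canonical_mime_header_key field_name (canonical_mime_header_key field_name)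

-- ===== LEMMAS AND PROOFS =====

-- the two validity tests agree char for char
lemma pv_table_eq : pvTokenCharsB = pvTokenTableA := by decide

lemma pv_table_lt128 : pvTokenTableA.all (fun c => decide (c.toNat < 128)) = true := by decide

lemma pv_valid_eq (ch : Char) :
    pvValidHeaderKeyChar ch = pvTokenCharsB.contains ch := by
  rw [pv_table_eq]
  unfold pvValidHeaderKeyChar
  cases hc : pvTokenTableA.contains ch with
  | false => simp
  | true =>
    have hm : ch ∈ pvTokenTableA := by
      simpa using hc
    have h128 := List.all_eq_true.mp pv_table_lt128 ch hm
    simp at h128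
    simp [h128]

-- the char A emits, as a function of the 'upper' flag
def pvEmit (u : Bool) (ch : Char) : Char :=
  if u = true ∧ 'a' ≤ ch ∧ ch ≤ 'z' then PySem.Chars.upperChar ch
  else if ¬ u = true ∧ 'A' ≤ ch ∧ ch ≤ 'Z' then PySem.Chars.lowerChar ch
  else ch

lemma pv_emit_true (ch : Char) : pvEmit true ch = PySem.Chars.upperChar ch := by
  unfold pvEmit PySem.Chars.upperChar PySem.Chars.islower
  by_cases h : 'a' ≤ ch ∧ ch ≤ 'z'
  · simp [h]
  · simp [h]

lemma pv_emit_false (ch : Char) : pvEmit false ch = PySem.Chars.lowerChar ch := by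
  unfold pvEmit PySem.Chars.lowerChar PySem.Chars.isupper
  by_cases h : 'A' ≤ ch ∧ ch ≤ 'Z'
  · simp [h]
  · simp [h]

-- the flag-carrying loop, without the accumulator
def pvCase : List Char → Bool → List Char
  | [], _ => []
  | ch :: rest, u => pvEmit u ch :: pvCase rest (ch == '-')

lemma pvCaseLoopA_eq (cs : List Char) (acc : List Char) (u : Bool) :
    pvCaseLoopA cs acc u = acc ++ pvCase cs u := by
  induction cs generalizing acc u with
  | nil => simp [pvCaseLoopA, pvCase]
  | cons ch rest ih =>
    simp only [pvCaseLoopA, pvCase, pvEmit, ih, List.append_assoc, List.singleton_append]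

-- B's pipeline, with the head segment lower-cased instead of capitalized (the 'upper = false' state)
def pvLowHead : List (List Char) → List (List Char)
  | [] => []
  | s :: r => s.map PySem.Chars.lowerChar :: r.map pvCapitalize

lemma pv_intercalate_cons_cons (s x y : List Char) (l : List (List Char)) :
    List.intercalate s (x :: y :: l) = x ++ s ++ List.intercalate s (y :: l) := by
  simp [List.intercalate, List.intersperse]

lemma pvLowHead_cons_eq (s : List Char) (r : List (List Char)) :
    pvLowHead (s :: r) = s.map PySem.Chars.lowerChar :: r.map pvCapitalize := rfl

lemma pv_intercalate_cons_head (sep : List Char) (c : Char) (x : List Char) (l : List (List Char)) :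
    List.intercalate sep ((c :: x) :: l) = c :: List.intercalate sep (x :: l) := by
  cases l with
  | nil => simp [List.intercalate]
  | cons y l' =>
    rw [pv_intercalate_cons_cons, pv_intercalate_cons_cons]
    simp

lemma pv_case_split (cs : List Char) :
    pvCase cs true = List.intercalate ['-'] ((cs.splitOn '-').map pvCapitalize) ∧
    pvCase cs false = List.intercalate ['-'] (pvLowHead (cs.splitOn '-')) := by
  induction cs with
  | nil => constructor <;> rfl
  | cons ch rest ih =>
    obtain ⟨ih1, ih2⟩ := ih
    obtain ⟨s, r, hsr⟩ : ∃ s r, rest.splitOn '-' = s :: r := by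
      rcases hr : rest.splitOn '-' with _ | ⟨s, r⟩
      · exact absurd hr (List.splitOnP_ne_nil _ _)
      · exact ⟨s, r, rfl⟩
    by_cases h : ch = '-'
    · subst h
      have hsp : ('-' :: rest).splitOn '-' = [] :: rest.splitOn '-' := by
        simp [List.splitOn, List.splitOnP_cons]
      have e1 : pvEmit true '-' = '-' := by decide
      have e2 : pvEmit false '-' = '-' := by decide
      have e3 : ('-' == '-') = true := rfl
      constructor
      · simp only [pvCase, e1, e3]
        rw [ih1, hsp, hsr]
        simp only [List.map_cons]
        rw [pv_intercalate_cons_cons]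
        simp [pvCapitalize]
      · simp only [pvCase, e2, e3]
        rw [ih1, hsp, hsr, pvLowHead_cons_eq]
        simp only [List.map_cons, List.map_nil]
        rw [pv_intercalate_cons_cons]
        simp
    · have hsp : (ch :: rest).splitOn '-' = ((rest.splitOn '-').modifyHead (ch :: ·)) := by
        simp [List.splitOn, List.splitOnP_cons, h]
      have hne : (ch == '-') = false := by simp [h]
      constructor
      · simp only [pvCase, pv_emit_true, hne]
        rw [ih2, hsp, hsr, List.modifyHead, List.map_cons]
        simp only [pvCapitalize]
        rw [pv_intercalate_cons_head, pvLowHead_cons_eq]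
      · simp only [pvCase, pv_emit_false, hne]
        rw [ih2, hsp, hsr, List.modifyHead, pvLowHead_cons_eq, pvLowHead_cons_eq]
        simp only [List.map_cons]
        rw [pv_intercalate_cons_head]

-- ===== VERDICT (by name: the statement is the Claim_ definition above) =====
theorem canonical_mime_header_key_spec : Claim_equal_canonical_mime_header_key := by
  intro s _
  unfold Spec_canonical_mime_header_key canonical_mime_header_key canonical_mime_header_key_alt
  have hv : ∀ (l : List Char), l.all pvValidHeaderKeyChar
      = l.all (fun ch => pvTokenCharsB.contains ch) := by
    intro l
    induction l with
    | nil => rfl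
    | cons c t ih => simp [List.all_cons, pv_valid_eq, ih]
  rw [hv]
  split
  · rw [pvCaseLoopA_eq, List.nil_append, (pv_case_split s.toList).1]
  · rfl
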